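-- pv_equiv track=rewrite | github.com/dStensland/LostCity | crawlers/sources/greater_atlanta_christian_specialty_camps.py | _derive_tags
-- ===== SOURCE A (Python) =====
-- from typing import Optional
--
-- BASE_TAGS = ["camp", "family-friendly", "rsvp-required"]
--
-- def _age_band_tags(age_min: Optional[int], age_max: Optional[int]) -> list[str]:
--     if age_min is None and age_max is None:
--         return []
--     lo = age_min if age_min is not None else 0
--     hi = age_max if age_max is not None else 18
--     tags: list[str] = []
--     if lo <= 5 and hi >= 3:
--         tags.append("preschool")
--     if lo <= 12 and hi >= 5:
--         tags.append("elementary")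
--     if lo <= 13 and hi >= 10:
--         tags.append("tween")
--     if hi >= 13:
--         tags.append("teen")
--     return tags
--
-- def _derive_tags(title: str, age_min: Optional[int], age_max: Optional[int]) -> list[str]:
--     lowered = title.lower()
--     tags = list(BASE_TAGS)
--
--     if any(word in lowered for word in ["dance", "ballet", "singing", "broadway", "drama", "film", "art"]):
--         tags.append("arts")
--     if any(word in lowered for word in ["basketball", "baseball", "golf", "tennis", "volleyball", "cheer", "athlete", "pickleball"]):
--         tags.extend(["sports", "movement"])
--     if any(word in lowered for word in ["lego", "robotics", "coding", "stem", "chemistry"]):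
--         tags.append("stem")
--     if "chess" in lowered:
--         tags.append("chess")
--
--     tags.extend(_age_band_tags(age_min, age_max))
--     return list(dict.fromkeys(tags))
-- ===== SOURCE B (Python) =====
-- from typing import Optional
--
-- BASE_TAGS = ["camp", "family-friendly", "rsvp-required"]
--
-- # Flat keyword -> tags table (group order preserved so first occurrences match).
-- _KEYWORD_TAGS = [
--     ("dance", ["arts"]), ("ballet", ["arts"]), ("singing", ["arts"]),
--     ("broadway", ["arts"]), ("drama", ["arts"]), ("film", ["arts"]), ("art", ["arts"]),
--     ("basketball", ["sports", "movement"]), ("baseball", ["sports", "movement"]),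
--     ("golf", ["sports", "movement"]), ("tennis", ["sports", "movement"]),
--     ("volleyball", ["sports", "movement"]), ("cheer", ["sports", "movement"]),
--     ("athlete", ["sports", "movement"]), ("pickleball", ["sports", "movement"]),
--     ("lego", ["stem"]), ("robotics", ["stem"]), ("coding", ["stem"]),
--     ("stem", ["stem"]), ("chemistry", ["stem"]),
--     ("chess", ["chess"]),
-- ]
--
-- # Age bands as (lo cap or None, hi floor, tag) threshold rows.
-- _AGE_BANDS = [(5, 3, "preschool"), (12, 5, "elementary"), (13, 10, "tween"), (None, 13, "teen")]
--
-- def _band_ok(lo: int, hi: int, cap: Optional[int], floor_: int) -> bool: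
--     return (cap is None or lo <= cap) and hi >= floor_
--
-- def _age_tags(age_min: Optional[int], age_max: Optional[int]) -> list[str]:
--     if age_min is None and age_max is None:
--         return []
--     lo = 0 if age_min is None else age_min
--     hi = 18 if age_max is None else age_max
--     return [tag for cap, floor_, tag in _AGE_BANDS if _band_ok(lo, hi, cap, floor_)]
--
-- def _derive_tags(title: str, age_min: Optional[int], age_max: Optional[int]) -> list[str]:
--     lowered = title.lower()
--     tags = list(BASE_TAGS)
--     for kw, ts in _KEYWORD_TAGS:
--         if kw in lowered:
--             tags += ts
--     tags += _age_tags(age_min, age_max)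
--     out: list[str] = []
--     for t in tags:
--         if t not in out:
--             out.append(t)
--     return out
-- ===== Notes on version B (the rewrite author's own statement) =====
-- stated objective: idiomatic
-- what changed: Replaces the hard-coded if/any branch chain by a single scan over a flat (keyword, tags) data table and a (cap, floor, tag) age-band table, with an explicit first-occurrence dedup loop instead of dict.fromkeys.
import Mathlib
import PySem

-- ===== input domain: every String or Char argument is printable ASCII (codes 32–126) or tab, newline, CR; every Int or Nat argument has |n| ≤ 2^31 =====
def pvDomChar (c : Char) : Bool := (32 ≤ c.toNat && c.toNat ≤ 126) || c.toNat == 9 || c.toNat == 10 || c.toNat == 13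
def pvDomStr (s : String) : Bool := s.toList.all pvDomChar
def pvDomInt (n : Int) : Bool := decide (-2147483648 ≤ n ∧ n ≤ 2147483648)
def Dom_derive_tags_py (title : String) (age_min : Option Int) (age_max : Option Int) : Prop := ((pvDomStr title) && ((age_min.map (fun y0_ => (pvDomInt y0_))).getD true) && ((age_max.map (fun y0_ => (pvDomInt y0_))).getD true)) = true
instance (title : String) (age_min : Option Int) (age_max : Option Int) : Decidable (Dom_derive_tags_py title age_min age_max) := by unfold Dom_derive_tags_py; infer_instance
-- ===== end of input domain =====

-- B replaces A's hard-coded if/any branch chain by a flat (keyword, tags) data table and a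
-- (cap, floor, tag) age-band table plus an explicit first-occurrence dedup loop (objective: idiomatic).


-- ===== PORT A =====
def pvBaseTags : List String := ["camp", "family-friendly", "rsvp-required"]

def pvAgeBandTags (age_min : Option Int) (age_max : Option Int) : List String :=
  if age_min = none ∧ age_max = none then []
  else
    let lo : Int := match age_min with | some v => v | none => 0
    let hi : Int := match age_max with | some v => v | none => 18
    let tags : List String := []
    let tags := if lo ≤ 5 ∧ 3 ≤ hi then tags ++ ["preschool"] else tags
    let tags := if lo ≤ 12 ∧ 5 ≤ hi then tags ++ ["elementary"] else tags
    let tags := if lo ≤ 13 ∧ 10 ≤ hi then tags ++ ["tween"] else tags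
    let tags := if 13 ≤ hi then tags ++ ["teen"] else tags
    tags

def derive_tags_py (title : String) (age_min : Option Int) (age_max : Option Int) : List String :=
  let lowered := PySem.Str.lower title
  let tags := pvBaseTags
  let tags := if (["dance", "ballet", "singing", "broadway", "drama", "film", "art"].any
      (fun word => PySem.Str.isIn word lowered)) then tags ++ ["arts"] else tags
  let tags := if (["basketball", "baseball", "golf", "tennis", "volleyball", "cheer", "athlete", "pickleball"].any
      (fun word => PySem.Str.isIn word lowered)) then tags ++ ["sports", "movement"] else tags
  let tags := if (["lego", "robotics", "coding", "stem", "chemistry"].any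
      (fun word => PySem.Str.isIn word lowered)) then tags ++ ["stem"] else tags
  let tags := if PySem.Str.isIn "chess" lowered then tags ++ ["chess"] else tags
  let tags := tags ++ pvAgeBandTags age_min age_max
  PySem.List.dedup tags

-- ===== PORT B =====
def pvKeywordTags : List (String × List String) :=
  [("dance", ["arts"]), ("ballet", ["arts"]), ("singing", ["arts"]),
   ("broadway", ["arts"]), ("drama", ["arts"]), ("film", ["arts"]), ("art", ["arts"]),
   ("basketball", ["sports", "movement"]), ("baseball", ["sports", "movement"]),
   ("golf", ["sports", "movement"]), ("tennis", ["sports", "movement"]),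
   ("volleyball", ["sports", "movement"]), ("cheer", ["sports", "movement"]),
   ("athlete", ["sports", "movement"]), ("pickleball", ["sports", "movement"]),
   ("lego", ["stem"]), ("robotics", ["stem"]), ("coding", ["stem"]),
   ("stem", ["stem"]), ("chemistry", ["stem"]),
   ("chess", ["chess"])]

def pvAgeBands : List (Option Int × Int × String) :=
  [(some 5, 3, "preschool"), (some 12, 5, "elementary"), (some 13, 10, "tween"), (none, 13, "teen")]

def pvBandOk (lo : Int) (hi : Int) (cap : Option Int) (floor_ : Int) : Bool :=
  (cap.all fun c => decide (lo ≤ c)) && decide (floor_ ≤ hi)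

def pvAgeTags (age_min : Option Int) (age_max : Option Int) : List String :=
  if age_min = none ∧ age_max = none then []
  else
    let lo : Int := match age_min with | none => 0 | some v => v
    let hi : Int := match age_max with | none => 18 | some v => v
    (pvAgeBands.filter (fun row => pvBandOk lo hi row.1 row.2.1)).map (fun row => row.2.2)

def derive_tags_py_alt (title : String) (age_min : Option Int) (age_max : Option Int) : List String :=
  let lowered := PySem.Str.lower title
  let tags := pvKeywordTags.foldl
    (fun tags kt => if PySem.Str.isIn kt.1 lowered then tags ++ kt.2 else tags) pvBaseTags
  let tags := tags ++ pvAgeTags age_min age_max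
  tags.foldl (fun out t => PySem.Set.add out t) []

-- ===== PRECONDITION & SPEC =====
def Spec_derive_tags_py (title : String) (age_min : Option Int) (age_max : Option Int) (out : List String) : Prop := out = derive_tags_py_alt title age_min age_max
instance (title : String) (age_min : Option Int) (age_max : Option Int) (out : List String) : Decidable (Spec_derive_tags_py title age_min age_max out) := by unfold Spec_derive_tags_py; infer_instance

-- ===== CLAIM (what is proved, stated in full; the proofs are below) =====
def Claim_equal_derive_tags_py : Prop := ∀ (title : String) (age_min : Option Int) (age_max : Option Int), Dom_derive_tags_py title age_min age_max → Spec_derive_tags_py title age_min age_max (derive_tags_py title age_min age_max)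

-- ===== LEMMAS AND PROOFS =====

-- the four groups of the flat table, used only by the proofs
def pvG1 : List (String × List String) :=
  [("dance", ["arts"]), ("ballet", ["arts"]), ("singing", ["arts"]),
   ("broadway", ["arts"]), ("drama", ["arts"]), ("film", ["arts"]), ("art", ["arts"])]
def pvG2 : List (String × List String) :=
  [("basketball", ["sports", "movement"]), ("baseball", ["sports", "movement"]),
   ("golf", ["sports", "movement"]), ("tennis", ["sports", "movement"]),
   ("volleyball", ["sports", "movement"]), ("cheer", ["sports", "movement"]),
   ("athlete", ["sports", "movement"]), ("pickleball", ["sports", "movement"])]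
def pvG3 : List (String × List String) :=
  [("lego", ["stem"]), ("robotics", ["stem"]), ("coding", ["stem"]),
   ("stem", ["stem"]), ("chemistry", ["stem"])]
def pvG4 : List (String × List String) := [("chess", ["chess"])]

lemma pv_table_split : pvKeywordTags = pvG1 ++ (pvG2 ++ (pvG3 ++ pvG4)) := rfl

lemma pv_add_of_mem (s : List String) (x : String) (h : x ∈ s) : PySem.Set.add s x = s := by
  simp [PySem.Set.add, h]

lemma pv_update_of_subset (ts : List String) : ∀ (s : List String), (∀ x ∈ ts, x ∈ s) →
    PySem.Set.update s ts = s := by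
  induction ts with
  | nil => intro s _; simp [pysem]
  | cons x ts ih =>
      intro s h
      rw [PySem.Set.update_cons, pv_add_of_mem s x (h x (by simp))]
      exact ih s (fun y hy => h y (by simp [hy]))

lemma pv_update_foldl_rows (p : String → Bool) (ts : List String)
    (rows : List (String × List String)) (hrows : ∀ r ∈ rows, r.2 = ts) :
    ∀ (s acc : List String),
      PySem.Set.update s (rows.foldl (fun a kt => if p kt.1 = true then a ++ kt.2 else a) acc)
        = PySem.Set.update (PySem.Set.update s acc) (if rows.any (fun r => p r.1) then ts else []) := by
  induction rows with
  | nil => intro s acc; simp [PySem.Set.update_nil]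
  | cons r rows ih =>
      intro s acc
      have hr : r.2 = ts := hrows r (by simp)
      have hrest : ∀ r' ∈ rows, r'.2 = ts := fun r' h' => hrows r' (by simp [h'])
      rw [List.foldl_cons, List.any_cons]
      by_cases hp : p r.1 = true
      · rw [if_pos hp, hp, Bool.true_or, if_pos rfl, ih hrest s (acc ++ r.2), hr,
          PySem.Set.update_append]
        by_cases ha : rows.any (fun r => p r.1) = true
        · rw [if_pos ha]
          exact pv_update_of_subset ts _ (fun x hx => by simp [PySem.Set.mem_update, hx])
        · rw [if_neg ha, PySem.Set.update_nil]
      · have hp' : p r.1 = false := by simpa using hp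
        rw [if_neg hp, hp', Bool.false_or, ih hrest s acc]

lemma pv_append_ite (c : Prop) [Decidable c] (x y : List String) :
    (if c then x ++ y else x) = x ++ (if c then y else []) := by
  split_ifs <;> simp

lemma pv_age_tags_eq (age_min age_max : Option Int) :
    pvAgeTags age_min age_max = pvAgeBandTags age_min age_max := by
  cases age_min <;> cases age_max <;>
    simp only [pvAgeTags, pvAgeBandTags, pvAgeBands, pvBandOk, List.filter_cons, List.filter_nil,
      Option.all_some, Option.all_none, Bool.true_and, Bool.and_eq_true, decide_eq_true_eq,
      and_true, and_self, if_true, if_false, List.map_nil, List.nil_append,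
      reduceCtorEq, and_false] <;>
    split_ifs <;> rfl

theorem pv_main (title : String) (age_min age_max : Option Int) :
    derive_tags_py title age_min age_max = derive_tags_py_alt title age_min age_max := by
  dsimp only [derive_tags_py, derive_tags_py_alt]
  rw [pv_age_tags_eq]
  conv_rhs =>
    rw [← PySem.Set.ofList_eq_foldl, pv_table_split, List.foldl_append, List.foldl_append,
      List.foldl_append, PySem.Set.ofList_append,
      ← PySem.Set.update_nil_left (xs :=
        (pvG4.foldl (fun tags kt => if PySem.Str.isIn kt.1 (PySem.Str.lower title) = true then tags ++ kt.2 else tags)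
          (pvG3.foldl (fun tags kt => if PySem.Str.isIn kt.1 (PySem.Str.lower title) = true then tags ++ kt.2 else tags)
            (pvG2.foldl (fun tags kt => if PySem.Str.isIn kt.1 (PySem.Str.lower title) = true then tags ++ kt.2 else tags)
              (pvG1.foldl (fun tags kt => if PySem.Str.isIn kt.1 (PySem.Str.lower title) = true then tags ++ kt.2 else tags)
                pvBaseTags)))))]
  rw [pv_update_foldl_rows (fun w => PySem.Str.isIn w (PySem.Str.lower title)) ["chess"] pvG4 (by decide),
    pv_update_foldl_rows (fun w => PySem.Str.isIn w (PySem.Str.lower title)) ["stem"] pvG3 (by decide),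
    pv_update_foldl_rows (fun w => PySem.Str.isIn w (PySem.Str.lower title)) ["sports", "movement"] pvG2 (by decide),
    pv_update_foldl_rows (fun w => PySem.Str.isIn w (PySem.Str.lower title)) ["arts"] pvG1 (by decide),
    PySem.Set.update_nil_left]
  conv_lhs =>
    rw [PySem.List.dedup_eq_ofList, pv_append_ite, pv_append_ite, pv_append_ite, pv_append_ite,
      PySem.Set.ofList_append, PySem.Set.ofList_append, PySem.Set.ofList_append,
      PySem.Set.ofList_append, PySem.Set.ofList_append]
  simp only [pvG1, pvG2, pvG3, pvG4, List.any_cons, List.any_nil, Bool.or_false]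

-- ===== VERDICT (by name: the statement is the Claim_ definition above) =====
theorem derive_tags_py_spec : Claim_equal_derive_tags_py := by
  intro title age_min age_max _
  unfold Spec_derive_tags_py
  exact pv_main title age_min age_max
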